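-- pv_equiv track=rewrite | github.com/juanpablo311/Tesis | dominoes/juanp.py | num_counter
-- ===== SOURCE A (Python) =====
-- def num_counter(hand):
--   count=[]
--   for i in range(7):
--     j=0
--     for d in hand:
--       if i in d:
--         j+=1
--     count.append(j)
--   return(count)
-- ===== SOURCE B (Python) =====
-- def num_counter(hand):
--     count = [0] * 7
--     for a, b in hand:
--         if 0 <= a < 7:
--             count[a] += 1
--         if b != a and 0 <= b < 7:
--             count[b] += 1
--     return count
-- ===== Notes on version B (the rewrite author's own statement) =====
-- stated objective: alternative
-- what changed: Inverts the nesting: instead of seven membership scans over the hand (one per pip value), B makes a single pass over the hand, incrementing a 7-slot counter for each distinct in-range pip of each domino.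
import Mathlib
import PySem

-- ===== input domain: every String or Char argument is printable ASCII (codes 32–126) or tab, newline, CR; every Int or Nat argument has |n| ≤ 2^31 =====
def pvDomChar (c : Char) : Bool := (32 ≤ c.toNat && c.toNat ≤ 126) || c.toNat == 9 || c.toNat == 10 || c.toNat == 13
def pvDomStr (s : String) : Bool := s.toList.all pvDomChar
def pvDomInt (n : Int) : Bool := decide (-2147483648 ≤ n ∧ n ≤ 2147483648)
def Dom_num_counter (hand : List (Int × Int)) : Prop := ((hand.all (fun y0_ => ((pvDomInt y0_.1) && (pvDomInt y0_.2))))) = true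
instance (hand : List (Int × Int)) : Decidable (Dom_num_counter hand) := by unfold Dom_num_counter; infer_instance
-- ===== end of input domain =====

-- B makes one pass over the hand with a 7-slot counter instead of A's seven membership scans (objective: alternative single-pass decomposition).

-- ===== PORT A =====
-- for i in range(7): j = 0; for d in hand: if i in d: j += 1; count.append(j)
def num_counter (hand : List (Int × Int)) : List Int :=
  (PySem.List.pyRange 0 7 1).foldl
    (fun count i =>
      count ++ [hand.foldl (fun j d => if i = d.1 ∨ i = d.2 then j + 1 else j) 0])
    []

-- ===== PORT B =====
-- one update step of B's loop body: increment at a, then at b if b ≠ a, with range guards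
def pvStep (count : List Int) (d : Int × Int) : List Int :=
  let c1 := if 0 ≤ d.1 ∧ d.1 < 7 then count.set d.1.toNat (count.getD d.1.toNat 0 + 1) else count
  if d.2 ≠ d.1 ∧ 0 ≤ d.2 ∧ d.2 < 7 then c1.set d.2.toNat (c1.getD d.2.toNat 0 + 1) else c1

def num_counter_alt (hand : List (Int × Int)) : List Int :=
  hand.foldl pvStep [0, 0, 0, 0, 0, 0, 0]

-- ===== PRECONDITION & SPEC =====
def Spec_num_counter (hand : List (Int × Int)) (out : List Int) : Prop := out = num_counter_alt hand
instance (hand : List (Int × Int)) (out : List Int) : Decidable (Spec_num_counter hand out) := by unfold Spec_num_counter; infer_instance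

-- ===== CLAIM (what is proved, stated in full; the proofs are below) =====
def Claim_equal_num_counter : Prop := ∀ (hand : List (Int × Int)), Dom_num_counter hand → Spec_num_counter hand (num_counter hand)

-- ===== LEMMAS AND PROOFS =====

-- the per-pip count A computes
def pvCnt (i : Int) (hand : List (Int × Int)) : Int :=
  hand.foldl (fun j d => if i = d.1 ∨ i = d.2 then j + 1 else j) 0

theorem pvCnt_shift (i : Int) (hand : List (Int × Int)) :
    ∀ j : Int, hand.foldl (fun j d => if i = d.1 ∨ i = d.2 then j + 1 else j) j
      = j + pvCnt i hand := by
  induction hand with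
  | nil => intro j; simp [pvCnt]
  | cons d t ih =>
      intro j
      simp only [pvCnt, List.foldl_cons] at *
      rw [ih (if i = d.1 ∨ i = d.2 then j + 1 else j),
          ih (if i = d.1 ∨ i = d.2 then 0 + 1 else 0)]
      split_ifs <;> omega

theorem pvCnt_cons (i : Int) (d : Int × Int) (t : List (Int × Int)) :
    pvCnt i (d :: t) = (if i = d.1 ∨ i = d.2 then (1:Int) else 0) + pvCnt i t := by
  show (d :: t).foldl (fun j d => if i = d.1 ∨ i = d.2 then j + 1 else j) 0 = _
  rw [List.foldl_cons, pvCnt_shift]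
  split_ifs <;> omega

theorem pvStep_length (s : List Int) (d : Int × Int) : (pvStep s d).length = s.length := by
  unfold pvStep
  split_ifs <;> simp

theorem pvGetD_set {s : List Int} (hs : s.length = 7) {i : Nat} {v : Int} (k : Nat) (hk : k < 7) :
    (s.set i v)[k]?.getD 0 = if i = k then v else s[k]?.getD 0 := by
  by_cases h : i = k
  · subst h
    rw [List.getElem?_set_self (by omega)]
    simp
  · simp [List.getElem?_set, h]

theorem pvStep_getD (s : List Int) (hs : s.length = 7) (d : Int × Int) (k : Nat) (hk : k < 7) :
    (pvStep s d).getD k 0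
      = s.getD k 0 + (if (k : Int) = d.1 ∨ (k : Int) = d.2 then 1 else 0) := by
  obtain ⟨a, b⟩ := d
  by_cases h1 : 0 ≤ a ∧ a < 7 <;> by_cases h2 : b ≠ a ∧ 0 ≤ b ∧ b < 7 <;>
    simp only [pvStep, List.getD_eq_getElem?_getD, h1, h2, not_false_eq_true,
      and_true, true_and, ite_true, ite_false]
  · -- both pips in range, b ≠ a
    rw [if_pos h2.1]
    rw [pvGetD_set (i := b.toNat) (by simpa using hs) k hk,
        pvGetD_set hs k hk, pvGetD_set hs b.toNat (by omega)]
    by_cases q : b.toNat = k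
    · have hkb : (k : Int) = b := by omega
      have hab : ¬ (a.toNat = b.toNat) := by omega
      have hab' : ¬ (a.toNat = k) := by omega
      simp [q, hkb, hab']
    · by_cases p : a.toNat = k
      · have hka : ((k : Int) = a ∨ (k : Int) = b) := Or.inl (by omega)
        simp [q, p, hka]
      · have hne : ¬ ((k : Int) = a ∨ (k : Int) = b) := by omega
        simp [q, p, hne]
  · -- only a in range
    rw [pvGetD_set hs k hk]
    by_cases p : a.toNat = k
    · have hka : ((k : Int) = a ∨ (k : Int) = b) := Or.inl (by omega)
      simp [p, hka]
    · have hne : ¬ ((k : Int) = a ∨ (k : Int) = b) := by omega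
      simp [p, hne]
  · -- only b in range
    rw [if_pos h2.1, pvGetD_set hs k hk]
    by_cases q : b.toNat = k
    · have hkb : ((k : Int) = a ∨ (k : Int) = b) := Or.inr (by omega)
      simp [q, hkb]
    · have hne : ¬ ((k : Int) = a ∨ (k : Int) = b) := by omega
      simp [q, hne]
  · -- neither pip counts
    have hne : ¬ ((k : Int) = a ∨ (k : Int) = b) := by omega
    simp [hne]

theorem pvFold_spec (hand : List (Int × Int)) :
    ∀ s : List Int, s.length = 7 →
      hand.foldl pvStep s = (List.range 7).map (fun k => s.getD k 0 + pvCnt (k : Int) hand) := by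
  induction hand with
  | nil =>
      intro s hs
      match s, hs with
      | [a0, a1, a2, a3, a4, a5, a6], _ =>
          simp [pvCnt, List.range_succ]
  | cons d t ih =>
      intro s hs
      simp only [List.foldl_cons]
      rw [ih (pvStep s d) (by rw [pvStep_length, hs])]
      apply List.map_congr_left
      intro k hk
      rw [List.mem_range] at hk
      rw [pvStep_getD s hs d k hk, pvCnt_cons]
      ring

-- ===== VERDICT (by name: the statement is the Claim_ definition above) =====
theorem num_counter_spec : Claim_equal_num_counter := by
  intro hand _
  show num_counter hand = num_counter_alt hand
  rw [num_counter_alt, pvFold_spec hand [0,0,0,0,0,0,0] rfl]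
  simp [num_counter, PySem.List.pyRange, List.range_succ, pvCnt]
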